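/- GENERATED by farm/mkstatement.py from design/units.tsv (unit `vorbis_decode_initial.9`) and the assertions of Vorbis/Spec/DecodeInitial.lean — do not edit.
   THE STATEMENT of the proof unit `vorbis_decode_initial.9`: segment 9 of `vorbis_decode_initial` (8 instructions; entries 0x1133c3;
   exits ret; ranges 0x1133c3-0x1133d1)
   takes each of its entry assertions to one of its exit assertions (`Vorbis.Spec.vorbis_decode_initial.Seg9`), given the contracts of its callees.
   What the names mean: Vorbis/Spec/Basic.lean (the shared hypotheses), Vorbis/Spec/DecodeInitial.lean (the assertions). The theorem to prove:
   `theorem vorbis_decode_initial_9_ok : Vorbis.Spec.vorbis_decode_initial_9.Statement`. -/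
import Vorbis.Spec.DecodeInitial
namespace Vorbis.Spec.vorbis_decode_initial_9
open X86 X86.User Asan

/-- The statement of unit `vorbis_decode_initial.9`. -/
def Statement : Prop :=
  ∀ (Lay : Layout) (_hLay : Lay.hi = 0x1000000) (μ : Microarch) (_hμ : UserX.MicroOK μ) (u₀ : State)
    (_hcode : HasCodeNat Lay u₀ Vorbis.L.vorbis_decode_initial.entry Vorbis.Code.code_vorbis_decode_initial.nat Vorbis.L.vorbis_decode_initial.size),
    Vorbis.Spec.vorbis_decode_initial.Seg9 Lay μ u₀

end Vorbis.Spec.vorbis_decode_initial_9
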